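-- pv_equiv track=rewrite | github.com/vntimejsc-code/RetroAuto-v2 | scripts/generate_changelog.py | clean_commit_message
-- ===== SOURCE A (Python) =====
-- def clean_commit_message(message: str) -> str:
--     """Clean up commit message for changelog."""
--     # Remove prefixes
--     prefixes = ["feat:", "fix:", "chore:", "docs:", "refactor:", "auto:", "config:"]
--     for prefix in prefixes:
--         if message.lower().startswith(prefix):
--             message = message[len(prefix):].strip()
--             break
--
--     # Capitalize first letter
--     if message:
--         message = message[0].upper() + message[1:]
--
--     return message
-- ===== SOURCE B (Python) =====
-- _WORDS = {"feat", "fix", "chore", "docs", "refactor", "auto", "config"}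
--
--
-- def clean_commit_message(message: str) -> str:
--     """Clean up commit message for changelog."""
--     # Single left-to-right scan: lowercase the head until the first ':',
--     # instead of testing each known prefix separately.
--     head = []
--     for idx, ch in enumerate(message):
--         if ch == ':':
--             if ''.join(head) in _WORDS:
--                 message = message[idx + 1:].strip()
--             break
--         head.append(ch.lower())
--
--     # Capitalize first letter
--     if message:
--         message = message[0].upper() + message[1:]
--
--     return message
-- ===== Notes on version B (the rewrite author's own statement) =====
-- stated objective: alternative
-- what changed: Instead of testing the message against each of the seven known prefixes in turn, B scans the message once up to the first ':', lowercasing the head as it goes, and strips the tail when that head is one of the seven prefix words.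
import Mathlib
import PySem

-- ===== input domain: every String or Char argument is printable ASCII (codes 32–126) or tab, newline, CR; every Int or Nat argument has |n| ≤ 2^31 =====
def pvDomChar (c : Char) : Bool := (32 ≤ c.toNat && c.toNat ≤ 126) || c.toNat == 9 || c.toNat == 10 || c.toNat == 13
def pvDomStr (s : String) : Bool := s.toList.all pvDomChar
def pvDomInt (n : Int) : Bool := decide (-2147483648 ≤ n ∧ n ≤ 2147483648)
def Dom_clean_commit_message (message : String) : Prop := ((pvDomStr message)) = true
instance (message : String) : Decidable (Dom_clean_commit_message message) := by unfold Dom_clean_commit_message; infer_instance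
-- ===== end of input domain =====

-- B replaces A's seven separate prefix tests with one scan to the first ':' whose
-- lowercased head is looked up in the set of prefix words (objective: alternative).

-- ===== PORT A =====
-- the ordered prefix list A iterates over
def cmPrefixes : List String := ["feat:", "fix:", "chore:", "docs:", "refactor:", "auto:", "config:"]

-- A's for-loop with break: first matching prefix is stripped off, then the loop ends
def cmLoop : List String → String → String
  | [], m => m
  | p :: rest, m =>
    if PySem.Str.startswith (PySem.Str.lower m) p then
      PySem.Str.strip (PySem.Str.slice m (some (PySem.Str.len p)) none)
    else cmLoop rest m

def clean_commit_message (message : String) : String :=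
  let m := cmLoop cmPrefixes message
  -- `message[0].upper() + message[1:]` ported by hand on the char list (exact: upperChar per char)
  match m.toList with
  | [] => m
  | c :: cs => String.ofList (PySem.Chars.upperChar c :: cs)

-- ===== PORT B =====
def cmWords : List (List Char) :=
  ["feat".toList, "fix".toList, "chore".toList, "docs".toList, "refactor".toList, "auto".toList, "config".toList]

-- the scan of Source B: lowercase chars accumulate in `acc` until the first ':'
def cmScan : List Char → List Char → Option (List Char × List Char)
  | [], _ => none
  | c :: cs, acc => if c = ':' then some (acc, cs) else cmScan cs (acc ++ [PySem.Chars.lowerChar c])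

def cmBranch (cs : List Char) : List Char :=
  match cmScan cs [] with
  | some (h, rest) => if h ∈ cmWords then PySem.Chars.strip rest else cs
  | none => cs

def clean_commit_message_alt (message : String) : String :=
  let m := cmBranch message.toList
  match m with
  | [] => String.ofList m
  | c :: cs => String.ofList (PySem.Chars.upperChar c :: cs)

-- ===== PRECONDITION & SPEC =====
def Spec_clean_commit_message (message : String) (out : String) : Prop := out = clean_commit_message_alt message
instance (message : String) (out : String) : Decidable (Spec_clean_commit_message message out) := by unfold Spec_clean_commit_message; infer_instance

-- ===== CLAIM (what is proved, stated in full; the proofs are below) =====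
def Claim_equal_clean_commit_message : Prop := ∀ (message : String), Dom_clean_commit_message message → Spec_clean_commit_message message (clean_commit_message message)

-- ===== LEMMAS AND PROOFS =====

lemma lowerChar_eq_colon_iff (c : Char) : PySem.Chars.lowerChar c = ':' ↔ c = ':' := by
  unfold PySem.Chars.lowerChar PySem.Chars.isupper
  by_cases h : ('A' ≤ c ∧ c ≤ 'Z')
  · have h65 : 65 ≤ c.toNat := by simpa [Char.le_def] using h.1
    have h90 : c.toNat ≤ 90 := by simpa [Char.le_def] using h.2
    have hb : (decide ('A' ≤ c) && decide (c ≤ 'Z')) = true := by simp [h.1, h.2]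
    rw [if_pos hb]
    constructor
    · intro he
      exfalso
      have ht := congrArg Char.toNat he
      rw [Char.toNat_ofNat, if_pos (by left; omega : Nat.isValidChar (c.toNat + 32))] at ht
      have hcol : (':' : Char).toNat = 58 := by decide
      omega
    · intro he
      exfalso
      subst he
      have hcol : (':' : Char).toNat = 58 := by decide
      omega
  · have hb : (decide ('A' ≤ c) && decide (c ≤ 'Z')) = false := by
      rcases not_and_or.mp h with h1 | h1 <;> simp [h1]
    rw [if_neg (by simp [hb])]

lemma colon_mem_of_mem_lower {cs : List Char} (h : ':' ∈ PySem.Chars.lower cs) : ':' ∈ cs := by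
  unfold PySem.Chars.lower at h
  rcases List.mem_map.mp h with ⟨c, hc, he⟩
  rwa [(lowerChar_eq_colon_iff c).mp he] at hc

lemma colon_not_mem_map {pre : List Char} (h : ':' ∉ pre) : ':' ∉ pre.map PySem.Chars.lowerChar := by
  intro hm
  exact h (colon_mem_of_mem_lower hm)

-- a colon-free block followed by ':' determines itself inside any prefix relation
lemma colon_prefix_eq : ∀ {u v x y : List Char}, ':' ∉ u → ':' ∉ v →
    (u ++ ':' :: x) <+: (v ++ ':' :: y) → u = v := by
  intro u
  induction u with
  | nil =>
    intro v x y _ hv hp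
    cases v with
    | nil => rfl
    | cons b v' =>
      exfalso
      rcases hp with ⟨t, ht⟩
      simp at ht
      exact hv (by simp [← ht.1])
  | cons a u' ih =>
    intro v x y hu hv hp
    cases v with
    | nil =>
      exfalso
      rcases hp with ⟨t, ht⟩
      simp at ht
      exact hu (by simp [ht.1])
    | cons b v' =>
      rcases hp with ⟨t, ht⟩
      simp at ht
      have hab : a = b := ht.1
      have : (u' ++ ':' :: x) <+: (v' ++ ':' :: y) := ⟨t, by simpa using ht.2⟩
      have := ih (fun hm => hu (List.mem_cons_of_mem _ hm)) (fun hm => hv (List.mem_cons_of_mem _ hm)) this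
      simp [hab, this]

lemma cmScan_none {cs : List Char} : ∀ acc, cmScan cs acc = none ↔ ':' ∉ cs := by
  induction cs with
  | nil => intro acc; simp [cmScan]
  | cons c cs ih =>
    intro acc
    by_cases hc : c = ':'
    · subst hc; simp [cmScan]
    · simp only [cmScan, if_neg hc]
      rw [ih]
      simp [List.mem_cons, Ne.symm hc]

lemma cmScan_some {cs : List Char} : ∀ {acc h rest}, cmScan cs acc = some (h, rest) →
    ∃ pre, cs = pre ++ ':' :: rest ∧ ':' ∉ pre ∧ h = acc ++ pre.map PySem.Chars.lowerChar := by
  induction cs with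
  | nil => intro acc h rest hs; simp [cmScan] at hs
  | cons c cs ih =>
    intro acc h rest hs
    by_cases hc : c = ':'
    · subst hc
      simp [cmScan] at hs
      exact ⟨[], by simp [hs.1.symm, hs.2]⟩
    · simp only [cmScan, if_neg hc] at hs
      rcases ih hs with ⟨pre, h1, h2, h3⟩
      exact ⟨c :: pre, by simp [h1], by simp [List.mem_cons, Ne.symm hc, h2], by simp [h3]⟩

lemma lower_split (pre rest : List Char) :
    PySem.Chars.lower (pre ++ ':' :: rest) =
      pre.map PySem.Chars.lowerChar ++ ':' :: PySem.Chars.lower rest := by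
  unfold PySem.Chars.lower
  simp
  decide

lemma sw_fail_nocolon {cs : List Char} (h : ':' ∉ cs) (p : List Char) (hp : ':' ∈ p) :
    PySem.Chars.startswith (PySem.Chars.lower cs) p = false := by
  cases hsw : PySem.Chars.startswith (PySem.Chars.lower cs) p with
  | false => rfl
  | true =>
    exfalso
    have hpre := (PySem.Chars.startswith_iff _ _).mp hsw
    exact h (colon_mem_of_mem_lower (hpre.subset hp))

lemma sw_succ (pre rest : List Char) :
    PySem.Chars.startswith (PySem.Chars.lower (pre ++ ':' :: rest)) (pre.map PySem.Chars.lowerChar ++ [':']) = true := by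
  rw [lower_split]
  exact (PySem.Chars.startswith_iff _ _).mpr ⟨PySem.Chars.lower rest, by simp⟩

lemma sw_fail_ne {pre rest w : List Char} (hw : ':' ∉ w) (hpre : ':' ∉ pre)
    (hne : w ≠ pre.map PySem.Chars.lowerChar) :
    PySem.Chars.startswith (PySem.Chars.lower (pre ++ ':' :: rest)) (w ++ [':']) = false := by
  cases hsw : PySem.Chars.startswith (PySem.Chars.lower (pre ++ ':' :: rest)) (w ++ [':']) with
  | false => rfl
  | true =>
    exfalso
    have hp := (PySem.Chars.startswith_iff _ _).mp hsw
    rw [lower_split] at hp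
    have : (w ++ ':' :: ([] : List Char)) <+: (pre.map PySem.Chars.lowerChar ++ ':' :: PySem.Chars.lower rest) := by
      simpa using hp
    exact hne (colon_prefix_eq hw (colon_not_mem_map hpre) this)

-- the startswith condition of A's loop, as seen from the String side
lemma sw_str (m : String) (p : String) :
    PySem.Str.startswith (PySem.Str.lower m) p =
      PySem.Chars.startswith (PySem.Chars.lower m.toList) p.toList := by
  rw [PySem.Str.startswith_eq, PySem.Str.toList_lower]

-- core equality: A's prefix loop and B's scan-branch produce the same char list
lemma core_eq (message : String) :
    (cmLoop cmPrefixes message).toList = cmBranch message.toList := by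
  unfold cmBranch
  cases hs : cmScan message.toList [] with
  | none =>
    have hnc : ':' ∉ message.toList := (cmScan_none []).mp hs
    simp only [cmPrefixes, cmLoop, sw_str]
    rw [sw_fail_nocolon hnc (("feat:" : String).toList) (by decide),
        sw_fail_nocolon hnc (("fix:" : String).toList) (by decide),
        sw_fail_nocolon hnc (("chore:" : String).toList) (by decide),
        sw_fail_nocolon hnc (("docs:" : String).toList) (by decide),
        sw_fail_nocolon hnc (("refactor:" : String).toList) (by decide),
        sw_fail_nocolon hnc (("auto:" : String).toList) (by decide),
        sw_fail_nocolon hnc (("config:" : String).toList) (by decide)]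
    simp
  | some pr =>
    obtain ⟨h, rest⟩ := pr
    rcases cmScan_some hs with ⟨pre, hcs, hprenc, hh⟩
    simp only [List.nil_append] at hh
    have hT : ∀ w : List Char, h = w →
        PySem.Chars.startswith (PySem.Chars.lower (pre ++ ':' :: rest)) (w ++ [':']) = true := by
      intro w hw
      rw [show w = pre.map PySem.Chars.lowerChar from by rw [← hw, hh]]
      exact sw_succ pre rest
    have hF : ∀ w : List Char, ':' ∉ w → h ≠ w →
        PySem.Chars.startswith (PySem.Chars.lower (pre ++ ':' :: rest)) (w ++ [':']) = false := by
      intro w hwnc hw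
      exact sw_fail_ne hwnc hprenc (fun he => hw (by rw [hh, he]))
    simp only [cmPrefixes, cmLoop, sw_str]
    rw [hcs]
    rw [show ("feat:" : String).toList = ['f','e','a','t'] ++ [':'] from by decide,
        show ("fix:" : String).toList = ['f','i','x'] ++ [':'] from by decide,
        show ("chore:" : String).toList = ['c','h','o','r','e'] ++ [':'] from by decide,
        show ("docs:" : String).toList = ['d','o','c','s'] ++ [':'] from by decide,
        show ("refactor:" : String).toList = ['r','e','f','a','c','t','o','r'] ++ [':'] from by decide,
        show ("auto:" : String).toList = ['a','u','t','o'] ++ [':'] from by decide,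
        show ("config:" : String).toList = ['c','o','n','f','i','g'] ++ [':'] from by decide]
    by_cases h1 : h = ['f','e','a','t']
    · have hpl : pre.length = 4 := by
        have h' : List.map PySem.Chars.lowerChar pre = ['f','e','a','t'] := by rw [← hh, h1]
        simpa using congrArg List.length h'
      have hsl : PySem.List.slice (pre ++ ':' :: rest) (some 5) none = rest := by
        rw [show (5 : Int) = ((pre.length + 1 : Nat) : Int) from by rw [hpl]; decide,
            PySem.List.slice_from _ (by positivity), Int.toNat_natCast,
            show pre ++ ':' :: rest = (pre ++ [':']) ++ rest from by simp,
            show pre.length + 1 = (pre ++ [':']).length from by simp, List.drop_left]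
      rw [hT _ h1]
      simp [cmWords, h1, hcs, hsl]
    by_cases h2 : h = ['f','i','x']
    · have hpl : pre.length = 3 := by
        have h' : List.map PySem.Chars.lowerChar pre = ['f','i','x'] := by rw [← hh, h2]
        simpa using congrArg List.length h'
      have hsl : PySem.List.slice (pre ++ ':' :: rest) (some 4) none = rest := by
        rw [show (4 : Int) = ((pre.length + 1 : Nat) : Int) from by rw [hpl]; decide,
            PySem.List.slice_from _ (by positivity), Int.toNat_natCast,
            show pre ++ ':' :: rest = (pre ++ [':']) ++ rest from by simp,
            show pre.length + 1 = (pre ++ [':']).length from by simp, List.drop_left]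
      rw [hF _ (by decide) h1, hT _ h2]
      simp [cmWords, h2, hcs, hsl]
    by_cases h3 : h = ['c','h','o','r','e']
    · have hpl : pre.length = 5 := by
        have h' : List.map PySem.Chars.lowerChar pre = ['c','h','o','r','e'] := by rw [← hh, h3]
        simpa using congrArg List.length h'
      have hsl : PySem.List.slice (pre ++ ':' :: rest) (some 6) none = rest := by
        rw [show (6 : Int) = ((pre.length + 1 : Nat) : Int) from by rw [hpl]; decide,
            PySem.List.slice_from _ (by positivity), Int.toNat_natCast,
            show pre ++ ':' :: rest = (pre ++ [':']) ++ rest from by simp,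
            show pre.length + 1 = (pre ++ [':']).length from by simp, List.drop_left]
      rw [hF _ (by decide) h1, hF _ (by decide) h2, hT _ h3]
      simp [cmWords, h3, hcs, hsl]
    by_cases h4 : h = ['d','o','c','s']
    · have hpl : pre.length = 4 := by
        have h' : List.map PySem.Chars.lowerChar pre = ['d','o','c','s'] := by rw [← hh, h4]
        simpa using congrArg List.length h'
      have hsl : PySem.List.slice (pre ++ ':' :: rest) (some 5) none = rest := by
        rw [show (5 : Int) = ((pre.length + 1 : Nat) : Int) from by rw [hpl]; decide,
            PySem.List.slice_from _ (by positivity), Int.toNat_natCast,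
            show pre ++ ':' :: rest = (pre ++ [':']) ++ rest from by simp,
            show pre.length + 1 = (pre ++ [':']).length from by simp, List.drop_left]
      rw [hF _ (by decide) h1, hF _ (by decide) h2, hF _ (by decide) h3, hT _ h4]
      simp [cmWords, h4, hcs, hsl]
    by_cases h5 : h = ['r','e','f','a','c','t','o','r']
    · have hpl : pre.length = 8 := by
        have h' : List.map PySem.Chars.lowerChar pre = ['r','e','f','a','c','t','o','r'] := by rw [← hh, h5]
        simpa using congrArg List.length h'
      have hsl : PySem.List.slice (pre ++ ':' :: rest) (some 9) none = rest := by
        rw [show (9 : Int) = ((pre.length + 1 : Nat) : Int) from by rw [hpl]; decide,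
            PySem.List.slice_from _ (by positivity), Int.toNat_natCast,
            show pre ++ ':' :: rest = (pre ++ [':']) ++ rest from by simp,
            show pre.length + 1 = (pre ++ [':']).length from by simp, List.drop_left]
      rw [hF _ (by decide) h1, hF _ (by decide) h2, hF _ (by decide) h3, hF _ (by decide) h4, hT _ h5]
      simp [cmWords, h5, hcs, hsl]
    by_cases h6 : h = ['a','u','t','o']
    · have hpl : pre.length = 4 := by
        have h' : List.map PySem.Chars.lowerChar pre = ['a','u','t','o'] := by rw [← hh, h6]
        simpa using congrArg List.length h'
      have hsl : PySem.List.slice (pre ++ ':' :: rest) (some 5) none = rest := by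
        rw [show (5 : Int) = ((pre.length + 1 : Nat) : Int) from by rw [hpl]; decide,
            PySem.List.slice_from _ (by positivity), Int.toNat_natCast,
            show pre ++ ':' :: rest = (pre ++ [':']) ++ rest from by simp,
            show pre.length + 1 = (pre ++ [':']).length from by simp, List.drop_left]
      rw [hF _ (by decide) h1, hF _ (by decide) h2, hF _ (by decide) h3, hF _ (by decide) h4,
          hF _ (by decide) h5, hT _ h6]
      simp [cmWords, h6, hcs, hsl]
    by_cases h7 : h = ['c','o','n','f','i','g']
    · have hpl : pre.length = 6 := by
        have h' : List.map PySem.Chars.lowerChar pre = ['c','o','n','f','i','g'] := by rw [← hh, h7]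
        simpa using congrArg List.length h'
      have hsl : PySem.List.slice (pre ++ ':' :: rest) (some 7) none = rest := by
        rw [show (7 : Int) = ((pre.length + 1 : Nat) : Int) from by rw [hpl]; decide,
            PySem.List.slice_from _ (by positivity), Int.toNat_natCast,
            show pre ++ ':' :: rest = (pre ++ [':']) ++ rest from by simp,
            show pre.length + 1 = (pre ++ [':']).length from by simp, List.drop_left]
      rw [hF _ (by decide) h1, hF _ (by decide) h2, hF _ (by decide) h3, hF _ (by decide) h4,
          hF _ (by decide) h5, hF _ (by decide) h6, hT _ h7]
      simp [cmWords, h7, hcs, hsl]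
    · rw [hF _ (by decide) h1, hF _ (by decide) h2, hF _ (by decide) h3, hF _ (by decide) h4,
          hF _ (by decide) h5, hF _ (by decide) h6, hF _ (by decide) h7]
      simp [cmWords, h1, h2, h3, h4, h5, h6, h7, hcs]

-- ===== VERDICT (by name: the statement is the Claim_ definition above) =====
theorem clean_commit_message_spec : Claim_equal_clean_commit_message := by
  intro message _
  unfold Spec_clean_commit_message clean_commit_message clean_commit_message_alt
  have hc := core_eq message
  rw [← String.toList_inj]
  cases hl : cmBranch message.toList with
  | nil =>
    rw [hl] at hc
    simp [hc]
  | cons c cs =>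
    rw [hl] at hc
    simp [hc]
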